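-- pv_equiv track=rewrite | github.com/Mo0nl19ht/algorithm | programmers/level2/더맵게.py | solution
-- ===== SOURCE A (Python) =====
-- import heapq
--
-- def solution(scoville, K):
--     answer = 0
--     heapq.heapify(scoville)
--     while True:
--         fir = heapq.heappop(scoville)
--         if not scoville:
--             if fir < K:
--                 return -1
--             return answer
--         if fir >= K:
--             return answer
--         sec = heapq.heappop(scoville)
--         heapq.heappush(scoville, fir+sec*2)
--         answer += 1
--
--     return answer
-- ===== SOURCE B (Python) =====
-- def _insort(lst, x):
--     i = 0
--     while i < len(lst) and lst[i] <= x: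
--         i += 1
--     lst.insert(i, x)
--
--
-- def solution(scoville, K):
--     lst = sorted(scoville)
--     answer = 0
--     while True:
--         fir = lst.pop(0)
--         if not lst:
--             return -1 if fir < K else answer
--         if fir >= K:
--             return answer
--         sec = lst.pop(0)
--         _insort(lst, fir + sec * 2)
--         answer += 1
-- ===== Notes on version B (the rewrite author's own statement) =====
-- stated objective: alternative
-- what changed: Replaces the binary min-heap (heapify/heappop/heappush) with a single upfront sort plus a totally-ordered list maintained by ordered insertion of each mixed value; the two smallest are taken from the list head instead of extracted from a heap.
import Mathlib
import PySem

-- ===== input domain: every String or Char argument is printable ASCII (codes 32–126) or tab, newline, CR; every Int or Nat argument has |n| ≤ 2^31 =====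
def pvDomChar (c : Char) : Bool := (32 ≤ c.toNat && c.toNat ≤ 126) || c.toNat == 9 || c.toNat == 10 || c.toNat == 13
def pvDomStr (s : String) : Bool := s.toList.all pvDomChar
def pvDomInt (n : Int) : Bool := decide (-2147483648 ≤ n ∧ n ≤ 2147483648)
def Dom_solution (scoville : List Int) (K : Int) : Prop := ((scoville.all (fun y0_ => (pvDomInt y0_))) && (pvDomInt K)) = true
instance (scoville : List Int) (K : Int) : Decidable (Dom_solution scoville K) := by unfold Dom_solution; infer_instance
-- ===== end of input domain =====

-- B replaces A's min-heap with one upfront sort + ordered insertion; equivalence is on the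
-- RETURN value only (Python A mutates its argument in place via heapify/heappop, B does not).

-- ===== PORT A =====
-- heapq is ported at value level: heappop = extract the minimum (PySem.List.min?, erase one
-- occurrence), heappush = append, heapify = identity on the content; this is exact for the
-- returned Int since only the multiset of values determines every popped minimum.
def loopA (K : Int) (s : List Int) (ans : Int) : Int :=
  match h : PySem.List.min? s (fun x => x) with
  | none => 0   -- heappop on an empty list raises IndexError in Python: outside Pre_solution
  | some fir =>
    let rest := s.erase fir
    if rest = [] then (if fir < K then -1 else ans)
    else if fir ≥ K then ans
    else
      match h2 : PySem.List.min? rest (fun x => x) with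
      | none => 0   -- unreachable (rest ≠ [])
      | some sec => loopA K ((rest.erase sec) ++ [fir + sec * 2]) (ans + 1)
termination_by s.length
decreasing_by
  have h1 : fir ∈ s := PySem.List.min?_mem h
  have hsec : sec ∈ s.erase fir := PySem.List.min?_mem h2
  have l1 : (s.erase fir).length = s.length - 1 := List.length_erase_of_mem h1
  have l2 : ((s.erase fir).erase sec).length = (s.erase fir).length - 1 :=
    List.length_erase_of_mem hsec
  have hpos : 0 < (s.erase fir).length := List.length_pos_of_mem hsec
  simp only [List.length_append, List.length_cons, List.length_nil]
  omega

def solution (scoville : List Int) (K : Int) : Int :=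
  loopA K scoville 0

-- ===== PORT B =====
-- _insort: linear scan past all elements ≤ x, insert x there (as in Source B)
def insortB (lst : List Int) (x : Int) : List Int :=
  match lst with
  | [] => [x]
  | a :: t => if a ≤ x then a :: insortB t x else x :: a :: t

theorem length_insortB (lst : List Int) (x : Int) :
    (insortB lst x).length = lst.length + 1 := by
  induction lst with
  | nil => rfl
  | cons a t ih => simp only [insortB]; split <;> simp [ih]

def loopB (K : Int) (lst : List Int) (ans : Int) : Int :=
  match lst with
  | [] => 0   -- lst.pop(0) on an empty list raises IndexError in Python: outside Pre_solution
  | fir :: rest =>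
    if rest = [] then (if fir < K then -1 else ans)
    else if fir ≥ K then ans
    else
      match rest with
      | [] => 0   -- unreachable (rest ≠ [])
      | sec :: rest2 => loopB K (insortB rest2 (fir + sec * 2)) (ans + 1)
termination_by lst.length
decreasing_by
  simp [length_insortB]

def solution_alt (scoville : List Int) (K : Int) : Int :=
  loopB K (PySem.List.sorted scoville (fun x => x) false) 0

-- ===== PRECONDITION & SPEC =====
-- Pre_ excludes only the empty list, on which Python A raises IndexError (heappop from empty).
def Pre_solution (scoville : List Int) (K : Int) : Prop := scoville ≠ []
instance (scoville : List Int) (K : Int) : Decidable (Pre_solution scoville K) := by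
  unfold Pre_solution; infer_instance
def pvWitness_solution : List Int × Int := ([1, 2, 3, 9, 10, 12], 7)

def Spec_solution (scoville : List Int) (K : Int) (out : Int) : Prop := out = solution_alt scoville K
instance (scoville : List Int) (K : Int) (out : Int) : Decidable (Spec_solution scoville K out) := by unfold Spec_solution; infer_instance

-- ===== CLAIM (what is proved, stated in full; the proofs are below) =====
def Claim_equal_solution : Prop := ∀ (scoville : List Int) (K : Int), Dom_solution scoville K → Pre_solution scoville K → Spec_solution scoville K (solution scoville K)

-- ===== LEMMAS AND PROOFS =====

theorem perm_insortB (lst : List Int) (x : Int) : (insortB lst x).Perm (x :: lst) := by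
  induction lst with
  | nil => simp [insortB]
  | cons a t ih =>
    simp only [insortB]
    split
    · exact ((ih.cons a).trans (List.Perm.swap x a t))
    · exact List.Perm.refl _

theorem pairwise_insortB (lst : List Int) (x : Int) (h : lst.Pairwise (· ≤ ·)) :
    (insortB lst x).Pairwise (· ≤ ·) := by
  induction lst with
  | nil => simp [insortB]
  | cons a t ih =>
    simp only [insortB]
    rcases List.pairwise_cons.1 h with ⟨ha, ht⟩
    split
    · rename_i hax
      refine List.pairwise_cons.2 ⟨?_, ih ht⟩
      intro b hb
      rcases List.mem_cons.1 ((perm_insortB t x).mem_iff.1 hb) with rfl | hbt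
      · exact hax
      · exact ha b hbt
    · rename_i hax
      refine List.pairwise_cons.2 ⟨?_, h⟩
      intro b hb
      rcases List.mem_cons.1 hb with rfl | hbt
      · omega
      · exact le_trans (by omega) (ha b hbt)

-- the minimum of s is the head of any sorted list permuted with s
theorem min?_of_perm_sorted (s : List Int) (fir : Int) (rest : List Int)
    (hp : (fir :: rest).Perm s) (hsort : (fir :: rest).Pairwise (· ≤ ·)) :
    PySem.List.min? s (fun x => x) = some fir := by
  have hne : s ≠ [] := by
    intro h; subst h; exact absurd hp.length_eq (by simp)
  cases hmin : PySem.List.min? s (fun x => x) with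
  | none => exact absurd ((PySem.List.min?_eq_none_iff _ _).1 hmin) hne
  | some m =>
    have hm : m ∈ s := PySem.List.min?_mem hmin
    have hmin' := PySem.List.min?_isMin hmin
    have hfir : fir ∈ s := hp.mem_iff.1 (by simp)
    have h1 : m ≤ fir := hmin' fir hfir
    have h2 : fir ≤ m := by
      have hm' : m ∈ fir :: rest := hp.mem_iff.2 hm
      rcases List.mem_cons.1 hm' with rfl | hmr
      · exact le_refl _
      · exact (List.pairwise_cons.1 hsort).1 m hmr
    have : m = fir := le_antisymm h1 h2
    rw [this]

theorem loop_eq (K : Int) : ∀ (n : ℕ) (s l : List Int) (ans : Int),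
    s.length = n → l.Perm s → l.Pairwise (· ≤ ·) → loopB K l ans = loopA K s ans := by
  intro n
  induction n with
  | zero =>
    intro s l ans hlen hp _
    have hs : s = [] := List.length_eq_zero_iff.1 hlen
    subst hs
    have hl : l = [] := hp.eq_nil
    subst hl
    rw [loopB, loopA,
      show PySem.List.min? ([] : List Int) (fun x => x) = none from
        (PySem.List.min?_eq_none_iff _ _).2 rfl]
  | succ n ih =>
    intro s l ans hlen hp hsort
    cases l with
    | nil =>
      exact absurd (hp.symm.eq_nil) (by intro h; subst h; simp at hlen)
    | cons fir rest =>
      have hmin := min?_of_perm_sorted s fir rest hp hsort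
      rw [loopB.eq_def, loopA.eq_def, hmin]
      simp only
      have hperase : rest.Perm (s.erase fir) := by
        have := hp.erase fir
        simpa using this
      have hlenrest : rest.length = (s.erase fir).length := hperase.length_eq
      by_cases hre : rest = []
      · subst hre
        have : s.erase fir = [] := by
          have := hlenrest; simpa [List.length_eq_zero_iff] using this.symm
        simp [this]
      · have hAe : s.erase fir ≠ [] := by
          intro h; rw [h] at hlenrest; exact hre (List.length_eq_zero_iff.1 hlenrest)
        simp only [if_neg hre, if_neg hAe]
        by_cases hfk : fir ≥ K
        · simp [hfk]
        · simp only [if_neg hfk]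
          cases rest with
          | nil => exact absurd rfl hre
          | cons sec rest2 =>
            have hsortr : (sec :: rest2).Pairwise (· ≤ ·) := (List.pairwise_cons.1 hsort).2
            have hmin2 := min?_of_perm_sorted (s.erase fir) sec rest2 hperase hsortr
            rw [hmin2]
            simp only
            -- lengths for the inductive step
            have hfir : fir ∈ s := hp.mem_iff.1 (by simp)
            have hsec : sec ∈ s.erase fir := hperase.mem_iff.1 (by simp)
            have l1 : (s.erase fir).length = s.length - 1 := List.length_erase_of_mem hfir
            have l2 : ((s.erase fir).erase sec).length = (s.erase fir).length - 1 :=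
              List.length_erase_of_mem hsec
            have hlen2 : ((s.erase fir).erase sec ++ [fir + sec * 2]).length = n := by
              simp only [List.length_append, List.length_cons, List.length_nil]
              have hpos : 0 < (s.erase fir).length := List.length_pos_of_mem hsec
              omega
            have hperm2 :
                (insortB rest2 (fir + sec * 2)).Perm ((s.erase fir).erase sec ++ [fir + sec * 2]) := by
              refine (perm_insortB rest2 (fir + sec * 2)).trans ?_
              have hr2 : rest2.Perm ((s.erase fir).erase sec) := by
                have := hperase.erase sec
                simpa using this
              exact ((hr2.cons _).trans (List.perm_append_singleton _ _).symm)
            have hsort2 : (insortB rest2 (fir + sec * 2)).Pairwise (· ≤ ·) :=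
              pairwise_insortB _ _ (List.pairwise_cons.1 hsortr).2
            exact ih _ _ _ hlen2 hperm2 hsort2

-- ===== VERDICT (by name: the statement is the Claim_ definition above) =====
theorem solution_spec : Claim_equal_solution := by
  intro scoville K _ _
  unfold Spec_solution solution solution_alt
  exact (loop_eq K scoville.length scoville (PySem.List.sorted scoville (fun x => x) false) 0
    rfl (PySem.List.sorted_perm _ _ _) (by simpa using PySem.List.sorted_pairwise scoville (fun x => x))).symm
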